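-- pv_equiv track=rewrite | github.com/karljanos/Traffic_violations | datavis/adatviz_ui.py | month_calculator
-- ===== SOURCE A (Python) =====
-- def month_calculator(szam):
--     outp = ""
--     yrr = 2005
--     mnn = 10
--     sy = 0
--     sm = 0
--     for i in range(szam):
--         if mnn < 12:
--             mnn += 1
--         else:
--             yrr += 1
--             mnn = 1
--     sy = yrr
--     sm = mnn
--     vissz = min(szam, 9)
--     for i in range(vissz):
--         if sm > 1:
--             sm -= 1
--         else:
--             sy -= 1
--             sm = 12
--     outp = "%i/%i - %i/%i" %(sy,sm,yrr,mnn)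
--     return outp
-- ===== SOURCE B (Python) =====
-- def month_calculator(szam):
--     # O(1): months are counted linearly (Oct 2005 = absolute month index 24069),
--     # then decoded with // and %.
--     f = max(szam, 0)
--     t = 24069 + f            # forward end point
--     s = t - min(f, 9)        # back up at most 9 months
--     return "%i/%i - %i/%i" % (s // 12, s % 12 + 1, t // 12, t % 12 + 1)
-- ===== Notes on version B (the rewrite author's own statement) =====
-- stated objective: faster
-- what changed: replaces the two month-stepping loops (forward szam steps, back min(szam,9) steps) with O(1) modular arithmetic on an absolute month index
import Mathlib
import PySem

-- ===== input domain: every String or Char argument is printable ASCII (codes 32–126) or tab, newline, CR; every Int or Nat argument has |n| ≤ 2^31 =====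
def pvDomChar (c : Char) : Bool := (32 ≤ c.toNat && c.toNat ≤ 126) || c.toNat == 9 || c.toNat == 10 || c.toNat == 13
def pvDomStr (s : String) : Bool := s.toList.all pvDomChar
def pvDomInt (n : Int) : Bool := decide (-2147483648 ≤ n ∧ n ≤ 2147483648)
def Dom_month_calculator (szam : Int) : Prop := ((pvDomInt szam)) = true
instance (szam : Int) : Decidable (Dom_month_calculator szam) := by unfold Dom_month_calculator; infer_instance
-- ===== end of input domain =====

-- B replaces A's two month-stepping loops with O(1) modular arithmetic on an absolute month index.


-- ===== PORT A =====
def month_calculator (szam : Int) : String :=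
  let s1 := (PySem.List.pyRange 0 szam 1).foldl
    (fun (st : Int × Int) _ =>
      if st.2 < 12 then (st.1, st.2 + 1) else (st.1 + 1, (1 : Int)))
    ((2005 : Int), (10 : Int))
  let yrr := s1.1
  let mnn := s1.2
  let vissz := min szam 9
  let s2 := (PySem.List.pyRange 0 vissz 1).foldl
    (fun (st : Int × Int) _ =>
      if st.2 > 1 then (st.1, st.2 - 1) else (st.1 - 1, (12 : Int)))
    (yrr, mnn)
  PySem.Int.toStr s2.1 ++ "/" ++ PySem.Int.toStr s2.2 ++ " - " ++
    PySem.Int.toStr yrr ++ "/" ++ PySem.Int.toStr mnn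

-- ===== PORT B =====
def month_calculator_alt (szam : Int) : String :=
  let f := max szam 0
  let t := 24069 + f
  let s := t - min f 9
  PySem.Int.toStr (PySem.Int.floordiv s 12) ++ "/" ++ PySem.Int.toStr (PySem.Int.mod s 12 + 1) ++ " - " ++
    PySem.Int.toStr (PySem.Int.floordiv t 12) ++ "/" ++ PySem.Int.toStr (PySem.Int.mod t 12 + 1)

-- ===== PRECONDITION & SPEC =====
def Spec_month_calculator (szam : Int) (out : String) : Prop := out = month_calculator_alt szam
instance (szam : Int) (out : String) : Decidable (Spec_month_calculator szam out) := by unfold Spec_month_calculator; infer_instance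

-- ===== CLAIM (what is proved, stated in full; the proofs are below) =====
def Claim_equal_month_calculator : Prop := ∀ (szam : Int), Dom_month_calculator szam → Spec_month_calculator szam (month_calculator szam)

-- ===== LEMMAS AND PROOFS =====

-- decode an absolute month index into (year, month)
def pvDecode (k : Int) : Int × Int := (k / 12, k % 12 + 1)

theorem pvFwd (n : Nat) (k : Int) :
    (PySem.List.pyRange 0 n 1).foldl
      (fun (st : Int × Int) _ =>
        if st.2 < 12 then (st.1, st.2 + 1) else (st.1 + 1, (1 : Int)))
      (pvDecode k) = pvDecode (k + n) := by
  induction n generalizing k with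
  | zero => simp
  | succ m ih =>
      rw [show ((m + 1 : Nat) : Int) = (m : Int) + 1 by push_cast; ring,
        PySem.List.pyRange_one_succ_right (by positivity), List.foldl_append]
      rw [ih]
      simp only [List.foldl]
      unfold pvDecode
      by_cases h : (k + (m : Int)) % 12 + 1 < 12 <;> simp only [h, if_pos] <;>
        simp_all <;> constructor <;> omega

theorem pvBwd (n : Nat) (k : Int) :
    (PySem.List.pyRange 0 n 1).foldl
      (fun (st : Int × Int) _ =>
        if st.2 > 1 then (st.1, st.2 - 1) else (st.1 - 1, (12 : Int)))
      (pvDecode k) = pvDecode (k - n) := by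
  induction n generalizing k with
  | zero => simp
  | succ m ih =>
      rw [show ((m + 1 : Nat) : Int) = (m : Int) + 1 by push_cast; ring,
        PySem.List.pyRange_one_succ_right (by positivity), List.foldl_append]
      rw [ih]
      simp only [List.foldl]
      unfold pvDecode
      by_cases h : (k - (m : Int)) % 12 + 1 > 1 <;> simp only [h, if_pos] <;>
        simp_all <;> constructor <;> omega

-- ===== VERDICT (by name: the statement is the Claim_ definition above) =====
theorem month_calculator_spec : Claim_equal_month_calculator := by
  intro szam _
  unfold Spec_month_calculator month_calculator month_calculator_alt
  dsimp only
  by_cases hpos : 0 < szam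
  · have hsz : szam = ((szam.toNat : Nat) : Int) := by omega
    have hmin : min ((szam.toNat : Nat) : Int) 9 = (((min szam 9).toNat : Nat) : Int) := by
      omega
    have h1 : pvDecode 24069 = ((2005 : Int), (10 : Int)) := by decide
    rw [hsz, ← h1, pvFwd]
    simp only [Prod.mk.eta]
    rw [hmin, pvBwd]
    simp only [PySem.Int.floordiv_eq_ediv_of_pos (show (0:Int) < 12 by omega),
      PySem.Int.mod_eq_emod_of_pos (show (0:Int) < 12 by omega)]
    unfold pvDecode
    have e2 : max ((szam.toNat : Int)) 0 = (szam.toNat : Int) := by omega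
    have e3 : (((min szam 9).toNat : Nat) : Int) = min ((szam.toNat : Int)) 9 := by omega
    rw [e2, e3]
  · have h0 : PySem.List.pyRange 0 szam 1 = [] :=
      PySem.List.pyRange_one_eq_nil (by omega)
    have h0' : PySem.List.pyRange 0 (min szam 9) 1 = [] :=
      PySem.List.pyRange_one_eq_nil (by omega)
    have hf : max szam 0 = 0 := by omega
    rw [h0, h0', hf]
    decide
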